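-- pv_equiv track=rewrite | github.com/RuokeZhang/LC-OA | amazon2503/minimum_total_distance.py | computeMinimumTotalDistance
-- ===== SOURCE A (Python) =====
-- def computeMinimumTotalDistance(distribution_center_locations):
--     x = sorted(distribution_center_locations)
--     n = len(x)
--     if n <= 1:
--         return 0  # 题目要求两个仓库，但n<=1时无法覆盖，可能返回0或处理特殊情况，根据题意调整
--
--     # 计算前缀和数组
--     prefix_sum = [0] * (n + 1)
--     for i in range(n):
--         prefix_sum[i+1] = prefix_sum[i] + x[i]
--
--     # 预处理left_cost，left_cost[k]表示前k个元素的总距离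
--     left_cost = [0] * (n + 1)
--     for k in range(1, n+1):
--         start = 0
--         m = k
--         mid = (m - 1) // 2
--         pos = start + mid
--         sum_left_part = x[pos] * (mid + 1) - (prefix_sum[pos + 1] - prefix_sum[start])
--         sum_right_part = (prefix_sum[start + m] - prefix_sum[pos + 1]) - x[pos] * (m - (mid + 1))
--         left_cost[k] = sum_left_part + sum_right_part
--
--     # 预处理right_cost，right_cost[m]表示后m个元素的总距离
--     right_cost = [0] * (n + 1)
--     for m in range(1, n+1):
--         start = n - m
--         mid = (m - 1) // 2
--         pos = start + mid
--         sum_left_part = x[pos] * (mid + 1) - (prefix_sum[pos + 1] - prefix_sum[start])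
--         sum_right_part = (prefix_sum[start + m] - prefix_sum[pos + 1]) - x[pos] * (m - (mid + 1))
--         right_cost[m] = sum_left_part + sum_right_part
--
--     # 遍历所有可能的分割点k，找到最小的left_cost[k] + right_cost[n-k]
--     min_total = float('inf')
--     for k in range(1, n):
--         total = left_cost[k] + right_cost[n - k]
--         if total < min_total:
--             min_total = total
--
--     return min_total
-- ===== SOURCE B (Python) =====
-- def computeMinimumTotalDistance(distribution_center_locations):
--     x = sorted(distribution_center_locations)
--     n = len(x)
--     if n <= 1:
--         return 0
--     # left[k]: cost of serving the first k points from their (lower) median.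
--     # Adding point x[k-1] to a prefix of size k-1 shifts nothing: the new
--     # median-sum grows by exactly x[k-1] - x[(k-1)//2].
--     left = [0] * (n + 1)
--     for k in range(1, n + 1):
--         left[k] = left[k - 1] + x[k - 1] - x[(k - 1) // 2]
--     # right[m]: cost of serving the last m points; adding x[n-m] on the left
--     # grows it by x[n-1-(m-1)//2] - x[n-m].
--     right = [0] * (n + 1)
--     for m in range(1, n + 1):
--         right[m] = right[m - 1] + x[n - 1 - (m - 1) // 2] - x[n - m]
--     return min(left[k] + right[n - k] for k in range(1, n))
-- ===== Notes on version B (the rewrite author's own statement) =====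
-- stated objective: simpler
-- what changed: B drops A's prefix-sum array and per-split closed-form median-cost formulas, instead maintaining each group's cost by an O(1) incremental recurrence (adding the new extreme point changes the cost by its distance to the group's median); the min scan stays but A's float('inf') sentinel becomes a plain min().
import Mathlib
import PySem

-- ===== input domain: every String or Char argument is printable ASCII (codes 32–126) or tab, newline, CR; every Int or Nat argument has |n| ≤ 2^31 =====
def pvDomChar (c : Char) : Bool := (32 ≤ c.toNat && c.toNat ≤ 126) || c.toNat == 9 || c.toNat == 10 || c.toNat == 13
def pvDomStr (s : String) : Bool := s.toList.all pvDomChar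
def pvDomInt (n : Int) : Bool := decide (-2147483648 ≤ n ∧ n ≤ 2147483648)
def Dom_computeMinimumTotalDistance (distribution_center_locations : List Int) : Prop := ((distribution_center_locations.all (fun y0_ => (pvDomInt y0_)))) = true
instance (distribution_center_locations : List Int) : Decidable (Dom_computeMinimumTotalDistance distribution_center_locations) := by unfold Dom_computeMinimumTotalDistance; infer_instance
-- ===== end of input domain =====

-- B replaces A's prefix-sum array and per-k median formulas by two incremental
-- recurrences maintaining each group's cost directly (objective: simpler).

-- ===== PORT A =====
-- Python's float('inf') starting minimum is modeled as `none` (any int < inf);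
-- since n ≥ 2 the loop runs at least once, so the `none => 0` fallback is unreachable.
def computeMinimumTotalDistance (distribution_center_locations : List Int) : Int :=
  let x := PySem.List.sorted distribution_center_locations (fun y => y) false
  let n : Int := PySem.List.len x
  if n ≤ 1 then 0
  else
    let prefix_sum := (PySem.List.pyRange 0 n 1).foldl
      (fun ps i => PySem.List.pySetD ps (i+1) (PySem.List.pyGetD ps i 0 + PySem.List.pyGetD x i 0))
      (List.replicate (n+1).toNat 0)
    let left_cost := (PySem.List.pyRange 1 (n+1) 1).foldl
      (fun lc k =>
        let start : Int := 0
        let m : Int := k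
        let mid := PySem.Int.floordiv (m - 1) 2
        let pos := start + mid
        let sum_left_part := PySem.List.pyGetD x pos 0 * (mid + 1) -
          (PySem.List.pyGetD prefix_sum (pos + 1) 0 - PySem.List.pyGetD prefix_sum start 0)
        let sum_right_part := (PySem.List.pyGetD prefix_sum (start + m) 0 -
          PySem.List.pyGetD prefix_sum (pos + 1) 0) - PySem.List.pyGetD x pos 0 * (m - (mid + 1))
        PySem.List.pySetD lc k (sum_left_part + sum_right_part))
      (List.replicate (n+1).toNat 0)
    let right_cost := (PySem.List.pyRange 1 (n+1) 1).foldl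
      (fun rc m =>
        let start : Int := n - m
        let mid := PySem.Int.floordiv (m - 1) 2
        let pos := start + mid
        let sum_left_part := PySem.List.pyGetD x pos 0 * (mid + 1) -
          (PySem.List.pyGetD prefix_sum (pos + 1) 0 - PySem.List.pyGetD prefix_sum start 0)
        let sum_right_part := (PySem.List.pyGetD prefix_sum (start + m) 0 -
          PySem.List.pyGetD prefix_sum (pos + 1) 0) - PySem.List.pyGetD x pos 0 * (m - (mid + 1))
        PySem.List.pySetD rc m (sum_left_part + sum_right_part))
      (List.replicate (n+1).toNat 0)
    let r := (PySem.List.pyRange 1 n 1).foldl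
      (fun min_total k =>
        let total := PySem.List.pyGetD left_cost k 0 + PySem.List.pyGetD right_cost (n - k) 0
        match min_total with
        | none => some total
        | some v => if total < v then some total else some v)
      (none : Option Int)
    match r with
    | some v => v
    | none => 0

-- ===== PORT B =====
-- `min(...)` over a nonempty generator ported via PySem.List.min?; the `none => 0`
-- fallback is unreachable since n ≥ 2.
def computeMinimumTotalDistance_alt (distribution_center_locations : List Int) : Int :=
  let x := PySem.List.sorted distribution_center_locations (fun y => y) false
  let n : Int := PySem.List.len x
  if n ≤ 1 then 0
  else
    let left := (PySem.List.pyRange 1 (n+1) 1).foldl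
      (fun l k => PySem.List.pySetD l k
        (PySem.List.pyGetD l (k-1) 0 + PySem.List.pyGetD x (k-1) 0 -
         PySem.List.pyGetD x (PySem.Int.floordiv (k-1) 2) 0))
      (List.replicate (n+1).toNat 0)
    let right := (PySem.List.pyRange 1 (n+1) 1).foldl
      (fun r m => PySem.List.pySetD r m
        (PySem.List.pyGetD r (m-1) 0 + PySem.List.pyGetD x (n - 1 - PySem.Int.floordiv (m-1) 2) 0 -
         PySem.List.pyGetD x (n-m) 0))
      (List.replicate (n+1).toNat 0)
    match PySem.List.min?
        ((PySem.List.pyRange 1 n 1).map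
          (fun k => PySem.List.pyGetD left k 0 + PySem.List.pyGetD right (n-k) 0))
        (fun y => y) with
    | some v => v
    | none => 0

-- ===== PRECONDITION & SPEC =====
def Spec_computeMinimumTotalDistance (distribution_center_locations : List Int) (out : Int) : Prop := out = computeMinimumTotalDistance_alt distribution_center_locations
instance (distribution_center_locations : List Int) (out : Int) : Decidable (Spec_computeMinimumTotalDistance distribution_center_locations out) := by unfold Spec_computeMinimumTotalDistance; infer_instance

-- ===== CLAIM (what is proved, stated in full; the proofs are below) =====
def Claim_equal_computeMinimumTotalDistance : Prop := ∀ (distribution_center_locations : List Int), Dom_computeMinimumTotalDistance distribution_center_locations → Spec_computeMinimumTotalDistance distribution_center_locations (computeMinimumTotalDistance distribution_center_locations)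

-- ===== LEMMAS AND PROOFS =====

def pvPS (x : List Int) (i : Nat) : Int := (x.take i).sum

def pvL (n : Nat) (F : Nat → Int) (m : Nat) : List Int :=
  (List.range (n+1)).map (fun i => if i ≤ m then F i else 0)

lemma pvL_zero (n : Nat) (F : Nat → Int) (hF0 : F 0 = 0) :
    List.replicate (n+1) (0:Int) = pvL n F 0 := by
  apply List.ext_getElem
  · simp [pvL]
  · intro i h1 h2
    simp only [pvL, List.getElem_map, List.getElem_range, List.getElem_replicate]
    simp only [List.length_replicate] at h1
    rcases Nat.eq_zero_or_pos i with h | h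
    · simp [h, hF0]
    · rw [if_neg (by omega)]

lemma pvL_set (n : Nat) (F : Nat → Int) (m : Nat) :
    (pvL n F m).set (m+1) (F (m+1)) = pvL n F (m+1) := by
  apply List.ext_getElem
  · simp [pvL]
  · intro i h1 h2
    simp only [pvL, List.getElem_set, List.getElem_map, List.getElem_range]
    rcases eq_or_ne i (m+1) with h | h
    · simp [h]
    · rw [if_neg (by omega : ¬ (m+1 = i))]
      by_cases hi : i ≤ m
      · rw [if_pos hi, if_pos (by omega)]
      · rw [if_neg hi, if_neg (by omega)]

lemma pv_setfold (n : Nat) (F : Nat → Int) (hF0 : F 0 = 0) (v : List Int → Nat → Int)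
    (hv : ∀ j, j < n → v (pvL n F j) j = F (j+1)) :
    ∀ m, m ≤ n → (List.range m).foldl (fun a j => a.set (j+1) (v a j)) (List.replicate (n+1) 0) = pvL n F m := by
  intro m
  induction m with
  | zero => intro _; simpa using pvL_zero n F hF0
  | succ m ih =>
    intro hm
    rw [List.range_succ, List.foldl_append, ih (by omega)]
    simp only [List.foldl_cons, List.foldl_nil]
    rw [hv m (by omega), pvL_set n F m]

lemma pvL_last (n : Nat) (F : Nat → Int) : pvL n F n = (List.range (n+1)).map F := by
  apply List.map_congr_left
  intro i hi
  rw [List.mem_range] at hi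
  simp [if_pos (by omega : i ≤ n)]

lemma pv_getD_mapRange (F : Nat → Int) (m j : Nat) (h : j < m) :
    ((List.range m).map F).getD j 0 = F j := by
  rw [List.getD_eq_getElem?_getD]
  simp [h]

def pvGA (x : List Int) (k : Nat) : Int :=
  if k = 0 then 0 else
    let mid := (k-1)/2
    x.getD mid 0 * ((mid:Int)+1) - (pvPS x (mid+1) - pvPS x 0) +
      ((pvPS x k - pvPS x (mid+1)) - x.getD mid 0 * ((k:Int) - ((mid:Int)+1)))

def pvRA (N : Nat) (x : List Int) (m : Nat) : Int :=
  if m = 0 then 0 else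
    let mid := (m-1)/2
    let pos := N - m + mid
    x.getD pos 0 * ((mid:Int)+1) - (pvPS x (pos+1) - pvPS x (N-m)) +
      ((pvPS x N - pvPS x (pos+1)) - x.getD pos 0 * ((m:Int) - ((mid:Int)+1)))

def pvLB (x : List Int) : Nat → Int
  | 0 => 0
  | k+1 => pvLB x k + x.getD k 0 - x.getD (k/2) 0

def pvRB (N : Nat) (x : List Int) : Nat → Int
  | 0 => 0
  | m+1 => pvRB N x m + x.getD (N-1-m/2) 0 - x.getD (N-(m+1)) 0

lemma pvPS_succ (x : List Int) (j : Nat) (h : j < x.length) :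
    pvPS x (j+1) = pvPS x j + x.getD j 0 := by
  unfold pvPS
  rw [List.take_add_one, List.sum_append, List.getElem?_eq_getElem h]
  simp [List.getD_eq_getElem?_getD, List.getElem?_eq_getElem h]

lemma pvGA_eq_pvLB (x : List Int) : ∀ k, k ≤ x.length → pvGA x k = pvLB x k := by
  intro k
  induction k with
  | zero => intro _; simp [pvGA, pvLB]
  | succ k ih =>
    intro hk
    rcases Nat.eq_zero_or_pos k with rfl | hk1
    · -- k+1 = 1
      have h0 : 0 < x.length := by omega
      simp only [pvGA, pvLB, if_neg (by omega : ¬ (1 = 0))]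
      have : (1-1)/2 = 0 := by norm_num
      rw [this]
      rw [pvPS_succ x 0 h0]
      simp [pvPS]
    · -- delta step
      rw [pvLB, ← ih (by omega)]
      rcases Nat.even_or_odd k with ⟨t, ht⟩ | ⟨t, ht⟩
      · -- k = 2t, t ≥ 1
        subst ht
        have ht1 : 1 ≤ t := by omega
        have e1 : (t + t + 1 - 1)/2 = t := by omega
        have e2 : (t + t - 1)/2 = t - 1 := by omega
        simp only [pvGA, if_neg (by omega : ¬ (t + t + 1 = 0)), if_neg (by omega : ¬ (t + t = 0)), e1, e2]
        have h2t : t + t < x.length := by omega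
        have htlt : t < x.length := by omega
        rw [pvPS_succ x (t+t) h2t]
        have e3 : t - 1 + 1 = t := by omega
        rw [e3, pvPS_succ x t htlt]
        have e4 : (t+t)/2 = t := by omega
        rw [e4]
        have e5 : ((t - 1 : Nat) : Int) = (t : Int) - 1 := by omega
        rw [e5]
        push_cast
        ring
      · -- k = 2t+1
        subst ht
        have e1 : (2*t + 1 + 1 - 1)/2 = t := by omega
        have e2 : (2*t + 1 - 1)/2 = t := by omega
        simp only [pvGA, if_neg (by omega : ¬ (2*t + 1 + 1 = 0)), if_neg (by omega : ¬ (2*t + 1 = 0)), e1, e2]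
        have h2t : 2*t + 1 < x.length := by omega
        rw [pvPS_succ x (2*t+1) h2t]
        have e4 : (2*t+1)/2 = t := by omega
        rw [e4]
        push_cast
        ring

lemma pvRA_eq_pvRB (x : List Int) : ∀ m, m ≤ x.length → pvRA x.length x m = pvRB x.length x m := by
  intro m
  induction m with
  | zero => intro _; simp [pvRA, pvRB]
  | succ m ih =>
    intro hm
    rcases Nat.eq_zero_or_pos m with rfl | hm1
    · -- m+1 = 1
      have h0 : 0 < x.length := by omega
      simp only [pvRA, pvRB, if_neg (by omega : ¬ (1 = 0))]
      have e1 : (1-1)/2 = 0 := by norm_num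
      rw [e1]
      have e2 : x.length - 1 + 0 = x.length - 1 := by omega
      rw [e2]
      have e3 : x.length - 1 + 1 = x.length := by omega
      rw [e3]
      have e4 : x.length - 1 - 0 = x.length - 1 := by omega
      rw [e4]
      have e5 : x.length - (0+1) = x.length - 1 := by omega
      rw [e5]
      have E1 := pvPS_succ x (x.length - 1) (by omega)
      rw [show x.length - 1 + 1 = x.length from by omega] at E1
      rw [E1]
      push_cast
      ring
    · rw [pvRB, ← ih (by omega)]
      rcases Nat.even_or_odd m with ⟨t, ht⟩ | ⟨t, ht⟩
      · -- m = 2t, t ≥ 1, same pos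
        subst ht
        have ht1 : 1 ≤ t := by omega
        have hN : t + t + 1 ≤ x.length := by omega
        have e1 : (t + t + 1 - 1)/2 = t := by omega
        have e2 : (t + t - 1)/2 = t - 1 := by omega
        simp only [pvRA, if_neg (by omega : ¬ (t + t + 1 = 0)), if_neg (by omega : ¬ (t + t = 0)), e1, e2]
        have p1 : x.length - (t + t + 1) + t = x.length - t - 1 := by omega
        have p2 : x.length - (t + t) + (t - 1) = x.length - t - 1 := by omega
        rw [p1, p2]
        have q1 : x.length - t - 1 + 1 = x.length - t := by omega
        rw [q1]
        have q2 : x.length - (t + t) = (x.length - (t + t + 1)) + 1 := by omega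
        rw [q2, pvPS_succ x (x.length - (t + t + 1)) (by omega)]
        have i1 : x.length - 1 - (t + t)/2 = x.length - t - 1 := by omega
        rw [i1]
        have e5 : ((t - 1 : Nat) : Int) = (t : Int) - 1 := by omega
        rw [e5]
        push_cast
        ring
      · -- m = 2t+1, pos shifts
        subst ht
        have hN : 2*t + 2 ≤ x.length := by omega
        have e1 : (2*t + 1 + 1 - 1)/2 = t := by omega
        have e2 : (2*t + 1 - 1)/2 = t := by omega
        simp only [pvRA, if_neg (by omega : ¬ (2*t + 1 + 1 = 0)), if_neg (by omega : ¬ (2*t + 1 = 0)), e1, e2]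
        rw [show x.length - (2*t + 1 + 1) + t = x.length - t - 2 from by omega]
        rw [show x.length - t - 2 + 1 = x.length - t - 1 from by omega]
        rw [show x.length - (2*t + 1) + t = x.length - t - 1 from by omega]
        rw [show x.length - t - 1 + 1 = x.length - t from by omega]
        rw [show x.length - 1 - (2*t + 1)/2 = x.length - t - 1 from by omega]
        rw [show x.length - (2*t + 1 + 1) = x.length - 2*t - 2 from by omega]
        rw [show x.length - (2*t + 1) = x.length - 2*t - 1 from by omega]
        have E1 := pvPS_succ x (x.length - t - 1) (by omega)
        rw [show x.length - t - 1 + 1 = x.length - t from by omega] at E1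
        have E2 := pvPS_succ x (x.length - 2*t - 2) (by omega)
        rw [show x.length - 2*t - 2 + 1 = x.length - 2*t - 1 from by omega] at E2
        rw [E1, E2]
        push_cast
        ring

lemma pv_foldl_min_some (t : List Int) : ∀ v : Int,
    t.foldl (fun acc u => match acc with | none => some u | some w => if u < w then some u else some w)
      (some v) = some (t.foldl min v) := by
  induction t with
  | nil => intro v; rfl
  | cons a t ih =>
    intro v
    simp only [List.foldl_cons]
    have : (if a < v then some a else some v) = some (min v a) := by
      by_cases h : a < v
      · rw [if_pos h, min_eq_right (le_of_lt h)]
      · rw [if_neg h, min_eq_left (by omega)]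
    rw [this, ih]

lemma pv_foldl_min_opt (l : List Int) :
    l.foldl (fun acc u => match acc with | none => some u | some w => if u < w then some u else some w)
      none = PySem.List.min? l (fun y => y) := by
  cases l with
  | nil => simp [PySem.List.min?]
  | cons a t =>
    rw [PySem.List.min?_id_cons]
    simp only [List.foldl_cons]
    exact pv_foldl_min_some t a

lemma pv_setfold1 (n : Nat) (F : Nat → Int) (hF0 : F 0 = 0) (v : List Int → Nat → Int)
    (hv : ∀ j, j < n → v (pvL n F j) j = F (j+1)) (m : Nat) (hm : m ≤ n) :
    (List.range m).foldl (fun (a : List Int) (j : Nat) => PySem.List.pySetD a ((j:Int)+1) (v a j)) (List.replicate (n+1) 0) = pvL n F m := by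
  have : (fun (a : List Int) (j : Nat) => PySem.List.pySetD a ((j:Int)+1) (v a j))
      = fun a j => a.set (j+1) (v a j) := by
    funext a j
    rw [show ((j:Int))+1 = ((j+1:Nat):Int) from by push_cast; ring, PySem.List.pySetD_natCast]
  rw [this]
  exact pv_setfold n F hF0 v hv m hm

lemma pv_setfold2 (n : Nat) (F : Nat → Int) (hF0 : F 0 = 0) (v : List Int → Nat → Int)
    (hv : ∀ j, j < n → v (pvL n F j) j = F (j+1)) (m : Nat) (hm : m ≤ n) :
    (List.range m).foldl (fun (a : List Int) (j : Nat) => PySem.List.pySetD a (1+(j:Int)) (v a j)) (List.replicate (n+1) 0) = pvL n F m := by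
  have : (fun (a : List Int) (j : Nat) => PySem.List.pySetD a (1+(j:Int)) (v a j))
      = fun a j => a.set (j+1) (v a j) := by
    funext a j
    rw [show (1+(j:Int)) = ((j+1:Nat):Int) from by push_cast; ring, PySem.List.pySetD_natCast]
  rw [this]
  exact pv_setfold n F hF0 v hv m hm

lemma pv_prefix (x : List Int) :
    (PySem.List.pyRange 0 (x.length:Int) 1).foldl
      (fun ps i => PySem.List.pySetD ps (i+1) (PySem.List.pyGetD ps i 0 + PySem.List.pyGetD x i 0))
      (List.replicate ((x.length:Int)+1).toNat 0) = (List.range (x.length+1)).map (pvPS x) := by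
  rw [show ((x.length:Int)+1).toNat = x.length + 1 from by omega]
  rw [PySem.List.pyRange_one]
  rw [show ((x.length:Int) - 0).toNat = x.length from by omega]
  rw [List.foldl_map]
  simp only [zero_add]
  rw [pv_setfold1 x.length (pvPS x) (by simp [pvPS])
      (fun a j => PySem.List.pyGetD a (j:Int) 0 + PySem.List.pyGetD x (j:Int) 0)
      ?_ x.length (le_refl _), pvL_last]
  intro j hj
  simp only [PySem.List.pyGetD_natCast, pvL]
  rw [pv_getD_mapRange _ _ _ (by omega), if_pos (le_refl j), pvPS_succ x j hj]

lemma pv_leftA (x : List Int) :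
    (PySem.List.pyRange 1 ((x.length:Int)+1) 1).foldl
      (fun lc k => PySem.List.pySetD lc k
        (PySem.List.pyGetD x (0 + PySem.Int.floordiv (k-1) 2) 0 * (PySem.Int.floordiv (k-1) 2 + 1) -
          (PySem.List.pyGetD ((List.range (x.length+1)).map (pvPS x)) (0 + PySem.Int.floordiv (k-1) 2 + 1) 0 -
           PySem.List.pyGetD ((List.range (x.length+1)).map (pvPS x)) 0 0) +
          (PySem.List.pyGetD ((List.range (x.length+1)).map (pvPS x)) (0 + k) 0 -
           PySem.List.pyGetD ((List.range (x.length+1)).map (pvPS x)) (0 + PySem.Int.floordiv (k-1) 2 + 1) 0 -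
           PySem.List.pyGetD x (0 + PySem.Int.floordiv (k-1) 2) 0 * (k - (PySem.Int.floordiv (k-1) 2 + 1)))))
      (List.replicate ((x.length:Int)+1).toNat 0) = (List.range (x.length+1)).map (pvGA x) := by
  rw [show ((x.length:Int)+1).toNat = x.length + 1 from by omega]
  rw [PySem.List.pyRange_one]
  rw [show ((x.length:Int) + 1 - 1).toNat = x.length from by omega]
  rw [List.foldl_map]
  rw [pv_setfold2 x.length (pvGA x) (by simp [pvGA]) _ ?_ x.length (le_refl _), pvL_last]
  intro j hj
  rw [show (1 + (j:Int) - 1) = ((j:Nat):Int) from by ring]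
  rw [show PySem.Int.floordiv (j:Int) 2 = ((j/2 : Nat) : Int) from by
    exact_mod_cast PySem.Int.floordiv_natCast j 2]
  rw [show (0 + ((j/2:Nat):Int)) = ((j/2:Nat):Int) from by ring]
  rw [show ((j/2:Nat):Int) + 1 = ((j/2+1 : Nat):Int) from by push_cast; ring]
  rw [show (0 + (1 + (j:Int))) = ((j+1:Nat):Int) from by push_cast; ring]
  simp only [PySem.List.pyGetD_natCast, PySem.List.pyGetD_zero]
  rw [pv_getD_mapRange (pvPS x) (x.length+1) (j/2+1) (by omega),
      pv_getD_mapRange (pvPS x) (x.length+1) (j+1) (by omega),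
      pv_getD_mapRange (pvPS x) (x.length+1) 0 (by omega)]
  simp only [pvGA, if_neg (by omega : ¬ (j + 1 = 0))]
  rw [show (j + 1 - 1)/2 = j/2 from by omega]
  push_cast
  ring

lemma pv_leftB (x : List Int) :
    (PySem.List.pyRange 1 ((x.length:Int)+1) 1).foldl
      (fun l k => PySem.List.pySetD l k
        (PySem.List.pyGetD l (k-1) 0 + PySem.List.pyGetD x (k-1) 0 -
         PySem.List.pyGetD x (PySem.Int.floordiv (k-1) 2) 0))
      (List.replicate ((x.length:Int)+1).toNat 0) = (List.range (x.length+1)).map (pvLB x) := by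
  rw [show ((x.length:Int)+1).toNat = x.length + 1 from by omega]
  rw [PySem.List.pyRange_one]
  rw [show ((x.length:Int) + 1 - 1).toNat = x.length from by omega]
  rw [List.foldl_map]
  rw [pv_setfold2 x.length (pvLB x) (by simp [pvLB]) _ ?_ x.length (le_refl _), pvL_last]
  intro j hj
  rw [show (1 + (j:Int) - 1) = ((j:Nat):Int) from by ring]
  rw [show PySem.Int.floordiv (j:Int) 2 = ((j/2 : Nat) : Int) from by
    exact_mod_cast PySem.Int.floordiv_natCast j 2]
  simp only [PySem.List.pyGetD_natCast]
  rw [show (pvL x.length (pvLB x) j).getD j 0 = pvLB x j from by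
    simp only [pvL]; rw [pv_getD_mapRange _ _ _ (by omega)]; rw [if_pos (le_refl j)]]
  rfl

lemma pv_rightA (x : List Int) :
    (PySem.List.pyRange 1 ((x.length:Int)+1) 1).foldl
      (fun rc m => PySem.List.pySetD rc m
        (PySem.List.pyGetD x ((x.length:Int) - m + PySem.Int.floordiv (m-1) 2) 0 * (PySem.Int.floordiv (m-1) 2 + 1) -
          (PySem.List.pyGetD ((List.range (x.length+1)).map (pvPS x)) ((x.length:Int) - m + PySem.Int.floordiv (m-1) 2 + 1) 0 -
           PySem.List.pyGetD ((List.range (x.length+1)).map (pvPS x)) ((x.length:Int) - m) 0) +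
          (PySem.List.pyGetD ((List.range (x.length+1)).map (pvPS x)) ((x.length:Int) - m + m) 0 -
           PySem.List.pyGetD ((List.range (x.length+1)).map (pvPS x)) ((x.length:Int) - m + PySem.Int.floordiv (m-1) 2 + 1) 0 -
           PySem.List.pyGetD x ((x.length:Int) - m + PySem.Int.floordiv (m-1) 2) 0 * (m - (PySem.Int.floordiv (m-1) 2 + 1)))))
      (List.replicate ((x.length:Int)+1).toNat 0) = (List.range (x.length+1)).map (pvRA x.length x) := by
  rw [show ((x.length:Int)+1).toNat = x.length + 1 from by omega]
  rw [PySem.List.pyRange_one]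
  rw [show ((x.length:Int) + 1 - 1).toNat = x.length from by omega]
  rw [List.foldl_map]
  rw [pv_setfold2 x.length (pvRA x.length x) (by simp [pvRA]) _ ?_ x.length (le_refl _), pvL_last]
  intro j hj
  rw [show (1 + (j:Int) - 1) = ((j:Nat):Int) from by ring]
  rw [show PySem.Int.floordiv (j:Int) 2 = ((j/2 : Nat) : Int) from by
    exact_mod_cast PySem.Int.floordiv_natCast j 2]
  rw [show ((x.length:Int) - (1 + (j:Int)) + ((j/2:Nat):Int)) = ((x.length - (j+1) + j/2 : Nat):Int) from by omega]
  rw [show ((x.length - (j+1) + j/2 : Nat):Int) + 1 = ((x.length - (j+1) + j/2 + 1 : Nat):Int) from by push_cast; ring]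
  rw [show ((x.length:Int) - (1 + (j:Int))) = ((x.length - (j+1) : Nat):Int) from by omega]
  rw [show ((x.length - (j+1) : Nat):Int) + (1 + (j:Int)) = ((x.length : Nat):Int) from by omega]
  simp only [PySem.List.pyGetD_natCast]
  rw [pv_getD_mapRange (pvPS x) (x.length+1) (x.length - (j+1) + j/2 + 1) (by omega),
      pv_getD_mapRange (pvPS x) (x.length+1) (x.length - (j+1)) (by omega),
      pv_getD_mapRange (pvPS x) (x.length+1) x.length (by omega)]
  simp only [pvRA, if_neg (by omega : ¬ (j + 1 = 0))]
  rw [show (j + 1 - 1)/2 = j/2 from by omega]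
  push_cast
  ring

lemma pv_rightB (x : List Int) :
    (PySem.List.pyRange 1 ((x.length:Int)+1) 1).foldl
      (fun r m => PySem.List.pySetD r m
        (PySem.List.pyGetD r (m-1) 0 + PySem.List.pyGetD x ((x.length:Int) - 1 - PySem.Int.floordiv (m-1) 2) 0 -
         PySem.List.pyGetD x ((x.length:Int) - m) 0))
      (List.replicate ((x.length:Int)+1).toNat 0) = (List.range (x.length+1)).map (pvRB x.length x) := by
  rw [show ((x.length:Int)+1).toNat = x.length + 1 from by omega]
  rw [PySem.List.pyRange_one]
  rw [show ((x.length:Int) + 1 - 1).toNat = x.length from by omega]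
  rw [List.foldl_map]
  rw [pv_setfold2 x.length (pvRB x.length x) (by simp [pvRB]) _ ?_ x.length (le_refl _), pvL_last]
  intro j hj
  rw [show (1 + (j:Int) - 1) = ((j:Nat):Int) from by ring]
  rw [show PySem.Int.floordiv (j:Int) 2 = ((j/2 : Nat) : Int) from by
    exact_mod_cast PySem.Int.floordiv_natCast j 2]
  rw [show ((x.length:Int) - 1 - ((j/2:Nat):Int)) = ((x.length - 1 - j/2 : Nat):Int) from by omega]
  rw [show ((x.length:Int) - (1 + (j:Int))) = ((x.length - (j+1) : Nat):Int) from by omega]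
  simp only [PySem.List.pyGetD_natCast]
  rw [show (pvL x.length (pvRB x.length x) j).getD j 0 = pvRB x.length x j from by
    simp only [pvL]; rw [pv_getD_mapRange _ _ _ (by omega)]; rw [if_pos (le_refl j)]]
  rfl

lemma pv_minloop (f : Int → Int) (l : List Int) :
    l.foldl (fun acc k => match acc with
      | none => some (f k)
      | some v => if f k < v then some (f k) else some v) none
    = PySem.List.min? (l.map f) (fun y => y) := by
  rw [← pv_foldl_min_opt, List.foldl_map]

lemma pv_main (dcl : List Int) :
    computeMinimumTotalDistance dcl = computeMinimumTotalDistance_alt dcl := by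
  unfold computeMinimumTotalDistance computeMinimumTotalDistance_alt
  simp only [PySem.List.len_eq]
  set x := PySem.List.sorted dcl (fun y => y) false with hx
  by_cases h : (x.length : Int) ≤ 1
  · rw [if_pos h, if_pos h]
  · rw [if_neg h, if_neg h]
    rw [pv_prefix x, pv_leftA x, pv_rightA x, pv_leftB x, pv_rightB x]
    have hL : (List.range (x.length+1)).map (pvGA x) = (List.range (x.length+1)).map (pvLB x) :=
      List.map_congr_left (fun i hi => pvGA_eq_pvLB x i (by
        rw [List.mem_range] at hi; omega))
    have hR : (List.range (x.length+1)).map (pvRA x.length x) = (List.range (x.length+1)).map (pvRB x.length x) :=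
      List.map_congr_left (fun i hi => pvRA_eq_pvRB x i (by
        rw [List.mem_range] at hi; omega))
    rw [hL, hR]
    rw [pv_minloop]

-- ===== VERDICT (by name: the statement is the Claim_ definition above) =====
theorem computeMinimumTotalDistance_spec : Claim_equal_computeMinimumTotalDistance := by
  intro dcl _
  unfold Spec_computeMinimumTotalDistance
  exact pv_main dcl
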